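-- pv_equiv track=rewrite | github.com/kawaiimah/GoFish_Game | GoFish.py | checksets
-- ===== SOURCE A (Python) =====
-- def checksets(hand,sets):
--
--     # Check for completed sets
--     if hand != []:
--         count = 0
--         rank = 0
--         for i in range(len(hand)-1,-1,-1):
--             if rank != hand[i][0]:
--                 rank = hand[i][0]
--                 count = 1
--             else:
--                 count += 1
--             if count == 4:
--                 del hand[i:i+4]
--                 if rank == 1:
--                     sets.append('A')
--                 elif rank == 11:
--                     sets.append('J')
--                 elif rank == 12:
--                     sets.append('Q')
--                 elif rank == 13:
--                     sets.append('K')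
--                 else:
--                     sets.append(str(rank))
--                 count = 0
--     return hand, sets
-- ===== SOURCE B (Python) =====
-- def _rankname(rank):
--     if rank == 1:
--         return 'A'
--     if rank == 11:
--         return 'J'
--     if rank == 12:
--         return 'Q'
--     if rank == 13:
--         return 'K'
--     return str(rank)
--
--
-- def checksets(hand, sets):
--     # One left-to-right pass over consecutive rank runs; per run keep the first
--     # n%4 cards and emit n//4 set names, then reverse the names (A emits sets
--     # right-to-left).  Mutates hand and sets in place like A.
--     rebuilt = []
--     names = []
--     i = 0
--     n = len(hand)
--     while i < n:
--         j = i
--         while j < n and hand[j][0] == hand[i][0]: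
--             j += 1
--         run = j - i
--         rebuilt.extend(hand[i:i + run % 4])
--         names.extend([_rankname(hand[i][0])] * (run // 4))
--         i = j
--     hand[:] = rebuilt
--     sets.extend(reversed(names))
--     return hand, sets
-- ===== Notes on version B (the rewrite author's own statement) =====
-- stated objective: alternative
-- what changed: Replaces A's right-to-left index loop with stateful counting and in-place slice deletions by a single left-to-right pass over consecutive rank runs that keeps n%4 cards and emits n//4 set names per run (names reversed to match A's right-to-left order), rebuilding the hand once; it trades A's mutate-while-scanning for run grouping with a rebuilt list.
import Mathlib
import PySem

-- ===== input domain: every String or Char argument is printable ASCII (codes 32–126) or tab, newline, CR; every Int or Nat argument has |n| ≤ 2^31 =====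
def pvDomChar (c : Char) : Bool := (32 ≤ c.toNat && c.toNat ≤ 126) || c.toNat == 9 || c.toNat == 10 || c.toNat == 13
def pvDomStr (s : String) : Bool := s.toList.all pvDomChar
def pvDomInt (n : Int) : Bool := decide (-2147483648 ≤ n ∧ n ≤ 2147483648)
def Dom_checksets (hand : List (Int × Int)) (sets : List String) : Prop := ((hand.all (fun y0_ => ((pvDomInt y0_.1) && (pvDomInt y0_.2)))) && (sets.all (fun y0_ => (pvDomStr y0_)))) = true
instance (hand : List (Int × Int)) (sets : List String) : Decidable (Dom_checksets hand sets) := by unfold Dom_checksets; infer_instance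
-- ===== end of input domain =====

-- B replaces A's right-to-left index loop with in-place slice deletion by one
-- left-to-right pass over consecutive rank runs (keep run%4 cards, emit run//4
-- names, reverse the names); both Pythons mutate hand/sets in place the same way.

-- ===== PORT A =====
-- rank → set name (shared by both ports; identical branch chain in both Pythons)
def pvName (r : Int) : String :=
  if r = 1 then "A" else if r = 11 then "J" else if r = 12 then "Q"
  else if r = 13 then "K" else PySem.Int.toStr r

-- A's loop 'for i in range(len(hand)-1,-1,-1)': fuel = i+1, state (count, rank)
def pvLoopA (hand : List (Int × Int)) (sets : List String) (count rank : Int) :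
    Nat → (List (Int × Int)) × List String
  | 0 => (hand, sets)
  | (i+1) =>
    let x := (PySem.List.pyGet? hand (i : Int)).getD (0, 0)
    let count' := if rank ≠ x.1 then (1 : Int) else count + 1
    let rank' := if rank ≠ x.1 then x.1 else rank
    if count' = 4 then
      -- del hand[i:i+4]; sets.append(name); count = 0
      pvLoopA (hand.take i ++ hand.drop (i + 4)) (sets ++ [pvName rank']) 0 rank' i
    else
      pvLoopA hand sets count' rank' i

def checksets (hand : List (Int × Int)) (sets : List String) : (List (Int × Int)) × List String :=
  if hand ≠ [] then pvLoopA hand sets 0 0 hand.length else (hand, sets)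

-- ===== PORT B =====
-- B's outer while: peel the leading run (inner while = takeWhile/dropWhile),
-- accumulate (rebuilt, names) left to right.
def pvGoB : List (Int × Int) → (List (Int × Int)) × List String
  | [] => ([], [])
  | c :: rest =>
    let run := List.takeWhile (fun x => x.1 == c.1) (c :: rest)
    let rest' := List.dropWhile (fun x => x.1 == c.1) (c :: rest)
    let pr := pvGoB rest'
    (run.take (run.length % 4) ++ pr.1, List.replicate (run.length / 4) (pvName c.1) ++ pr.2)
termination_by l => l.length
decreasing_by
  simp only [List.dropWhile_cons, beq_self_eq_true, if_true]
  exact Nat.lt_succ_of_le (List.length_dropWhile_le _ _)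

def checksets_alt (hand : List (Int × Int)) (sets : List String) : (List (Int × Int)) × List String :=
  ((pvGoB hand).1, sets ++ (pvGoB hand).2.reverse)

-- ===== PRECONDITION & SPEC =====
def Spec_checksets (hand : List (Int × Int)) (sets : List String) (out : (List (Int × Int)) × List String) : Prop := out = checksets_alt hand sets
instance (hand : List (Int × Int)) (sets : List String) (out : (List (Int × Int)) × List String) : Decidable (Spec_checksets hand sets out) := by unfold Spec_checksets; infer_instance

-- ===== CLAIM (what is proved, stated in full; the proofs are below) =====
def Claim_equal_checksets : Prop := ∀ (hand : List (Int × Int)) (sets : List String), Dom_checksets hand sets → Spec_checksets hand sets (checksets hand sets)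

-- ===== LEMMAS AND PROOFS =====

-- with count 0 the entering rank is irrelevant: the first step yields (1, x.1) either way
lemma pvLoopA_count0 (hand : List (Int × Int)) (s : List String) (a b : Int) (f : Nat) :
    pvLoopA hand s 0 a f = pvLoopA hand s 0 b f := by
  cases f with
  | zero => rfl
  | succ i =>
    simp only [pvLoopA]
    by_cases ha : a = ((PySem.List.pyGet? hand (i : Int)).getD (0, 0)).1 <;>
    by_cases hb : b = ((PySem.List.pyGet? hand (i : Int)).getD (0, 0)).1 <;>
      (simp only [PySem.List.pyGet?_natCast] at ha hb; simp [ha, hb])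

-- counting phase: j in-run elements (rank k) below fuel b+j just increment count
lemma pvLoopA_count (j : Nat) (c : Int) (h : List (Int × Int)) (s : List String) (k : Int) (b : Nat)
    (hacc : ∀ t, t < j → ((PySem.List.pyGet? h ((b + t : Nat) : Int)).getD (0, 0)).1 = k)
    (hc0 : 0 ≤ c) (hc : c + j < 4) :
    pvLoopA h s c k (b + j) = pvLoopA h s (c + j) k b := by
  induction j generalizing c with
  | zero => simp
  | succ j ih =>
    have hx : ((PySem.List.pyGet? h ((b + j : Nat) : Int)).getD (0, 0)).1 = k :=
      hacc j (Nat.lt_succ_self j)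
    have hb : b + (j + 1) = (b + j) + 1 := rfl
    rw [hb]
    simp only [pvLoopA, hx]
    have h4 : ¬ (c + 1 = 4) := by
      have : (j : Int) ≥ 0 := Int.natCast_nonneg j
      omega
    simp only [ne_eq, not_true, if_false, if_neg h4, ite_self]
    have := ih (c + 1) (fun t ht => hacc t (Nat.lt_succ_of_lt ht)) (by omega) (by push_cast at hc ⊢; omega)
    rw [this]
    congr 1
    push_cast
    ring

-- processing a trailing run r (all rank k): delete length/4 sets, keep the first length%4 cards
lemma pvLoopA_run (m : Nat) : ∀ (r p : List (Int × Int)) (s : List String) (k : Int),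
    r.length = m → (∀ x ∈ r, x.1 = k) →
    pvLoopA (p ++ r) s 0 k (p.length + m) =
      pvLoopA (p ++ r.take (m % 4)) (s ++ List.replicate (m / 4) (pvName k)) ((m % 4 : Nat) : Int) k p.length := by
  induction m using Nat.strong_induction_on with
  | _ m ih =>
  intro r p s k hlen hk
  have hacc : ∀ b t : Nat, b + t < m →
      ((PySem.List.pyGet? (p ++ r) ((p.length + (b + t) : Nat) : Int)).getD (0, 0)).1 = k := by
    intro b t ht
    rw [PySem.List.pyGet?_natCast]
    rw [List.getElem?_append_right (Nat.le_add_right _ _)]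
    have ht' : b + t < r.length := by omega
    simp only [Nat.add_sub_cancel_left]
    rw [List.getElem?_eq_getElem ht']
    exact hk _ (List.getElem_mem ht')
  by_cases hm : m < 4
  · have h1 := pvLoopA_count m 0 (p ++ r) s k p.length
      (fun t ht => by simpa using hacc 0 t (by omega)) le_rfl (by omega)
    rw [h1]
    have htk : r.take m = r := by rw [← hlen, List.take_length]
    rw [Nat.mod_eq_of_lt hm, Nat.div_eq_of_lt hm, htk]
    simp
  · have hj : m = (m - 4) + 4 := by omega
    set j := m - 4 with hjdef
    have hfuel : p.length + m = (p.length + (j + 1)) + 3 := by omega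
    have h1 := pvLoopA_count 3 0 (p ++ r) s k (p.length + (j + 1))
      (fun t ht => by
        have := hacc (j + 1) t (by omega)
        simpa [Nat.add_assoc] using this) le_rfl (by norm_num)
    rw [hfuel, h1]
    -- one more step: count hits 4 at index p.length + j, deleting r's last four cards
    have hstep : p.length + (j + 1) = (p.length + j) + 1 := by omega
    rw [hstep]
    simp only [pvLoopA]
    have hxj : ((PySem.List.pyGet? (p ++ r) ((p.length + j : Nat) : Int)).getD (0, 0)).1 = k := by
      simpa using hacc j 0 (by omega)
    rw [hxj]
    simp only [ne_eq, not_true, if_false, ite_self]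
    norm_num
    have htake : (p ++ r).take (p.length + j) = p ++ r.take j := by
      rw [List.take_append, List.take_of_length_le (Nat.le_add_right _ _),
        Nat.add_sub_cancel_left]
    have hdrop : (p ++ r).drop (p.length + j + 4) = [] := by
      apply List.drop_eq_nil_of_le
      simp [hlen]; omega
    rw [htake, hdrop, List.append_nil]
    have ihj := ih j (by omega) (r.take j) p (s ++ [pvName k]) k
      (by rw [List.length_take]; omega) (fun x hx => hk x (List.mem_of_mem_take hx))
    rw [ihj]
    have e1 : (r.take j).take (j % 4) = r.take (j % 4) := by
      rw [List.take_take, min_eq_left (Nat.mod_le j 4)]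
    have e2 : m % 4 = j % 4 := by omega
    have e3 : m / 4 = j / 4 + 1 := by omega
    rw [e1, e2, e3]
    rw [List.append_assoc, List.singleton_append, ← List.replicate_succ]
    congr 1
    omega

-- a suffix beyond the remaining fuel (fuel + count ≤ |P|) is never touched
lemma pvLoopA_suffix (fuel : Nat) : ∀ (P q : List (Int × Int)) (s : List String) (c rk : Int),
    0 ≤ c → (fuel : Int) + c ≤ P.length →
    pvLoopA (P ++ q) s c rk fuel = ((pvLoopA P s c rk fuel).1 ++ q, (pvLoopA P s c rk fuel).2) := by
  induction fuel with
  | zero => intro P q s c rk _ _; simp [pvLoopA]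
  | succ i ih =>
    intro P q s c rk hc hle
    have hi : i < P.length := by omega
    simp only [pvLoopA]
    have hx : (PySem.List.pyGet? (P ++ q) (i : Int)).getD (0, 0) =
        (PySem.List.pyGet? P (i : Int)).getD (0, 0) := by
      rw [PySem.List.pyGet?_natCast, PySem.List.pyGet?_natCast, List.getElem?_append_left hi]
    rw [hx]
    by_cases hr : rk = (((PySem.List.pyGet? P (i : Int)).getD (0, 0)).1)
    · have hcond : ¬ (rk ≠ (((PySem.List.pyGet? P (i : Int)).getD (0, 0)).1)) := by simp [hr]
      simp only [if_neg hcond]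
      by_cases h4 : c + 1 = 4
      · rw [if_pos h4, if_pos h4]
        have hi4 : i + 4 ≤ P.length := by omega
        have htk : (P ++ q).take i = P.take i := by
          rw [List.take_append, Nat.sub_eq_zero_of_le (le_of_lt hi), List.take_zero,
            List.append_nil]
        have hdr : (P ++ q).drop (i + 4) = P.drop (i + 4) ++ q := by
          rw [List.drop_append, Nat.sub_eq_zero_of_le hi4, List.drop_zero]
        rw [htk, hdr, ← List.append_assoc]
        exact ih (P.take i ++ P.drop (i + 4)) q _ 0 _ le_rfl
          (by rw [List.length_append, List.length_take, List.length_drop]; omega)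
      · rw [if_neg h4, if_neg h4]
        exact ih P q s (c + 1) rk (by omega) (by omega)
    · simp only [hr, ne_eq, not_false_iff, if_true]
      have h14 : ¬ ((1 : Int) = 4) := by norm_num
      rw [if_neg h14, if_neg h14]
      exact ih P q s 1 _ (by norm_num) (by omega)

-- takeWhile/dropWhile over an append (small helpers; not in this Mathlib by these shapes)
lemma pvTwApp (l₁ l₂ : List (Int × Int)) (p : Int × Int → Bool) (h : ∀ x ∈ l₁, p x) :
    (l₁ ++ l₂).takeWhile p = l₁ ++ l₂.takeWhile p := by
  induction l₁ with
  | nil => simp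
  | cons a t ih =>
    simp only [List.cons_append, List.takeWhile_cons, h a List.mem_cons_self, if_true]
    rw [ih (fun x hx => h x (List.mem_cons_of_mem a hx))]

lemma pvDwApp (l₁ l₂ : List (Int × Int)) (p : Int × Int → Bool) (h : ∀ x ∈ l₁, p x) :
    (l₁ ++ l₂).dropWhile p = l₂.dropWhile p := by
  induction l₁ with
  | nil => simp
  | cons a t ih =>
    simp only [List.cons_append, List.dropWhile_cons, h a List.mem_cons_self, if_true]
    exact ih (fun x hx => h x (List.mem_cons_of_mem a hx))

lemma pvTwApp' (l₁ l₂ : List (Int × Int)) (p : Int × Int → Bool) (h : l₁.dropWhile p ≠ []) :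
    (l₁ ++ l₂).takeWhile p = l₁.takeWhile p := by
  induction l₁ with
  | nil => exact absurd rfl h
  | cons a t ih =>
    by_cases hp : p a
    · simp only [List.dropWhile_cons, hp, if_true] at h
      simp only [List.cons_append, List.takeWhile_cons, hp, if_true]
      rw [ih h]
    · simp [hp]

lemma pvDwApp' (l₁ l₂ : List (Int × Int)) (p : Int × Int → Bool) (h : l₁.dropWhile p ≠ []) :
    (l₁ ++ l₂).dropWhile p = l₁.dropWhile p ++ l₂ := by
  induction l₁ with
  | nil => exact absurd rfl h
  | cons a t ih =>
    by_cases hp : p a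
    · simp only [List.dropWhile_cons, hp, if_true] at h
      simp only [List.cons_append, List.dropWhile_cons, hp, if_true]
      exact ih h
    · simp [hp]

-- pvGoB on a single nonempty run
lemma pvGoB_single (r : List (Int × Int)) (k : Int) (hne : r ≠ []) (hk : ∀ x ∈ r, x.1 = k) :
    pvGoB r = (r.take (r.length % 4), List.replicate (r.length / 4) (pvName k)) := by
  cases r with
  | nil => exact absurd rfl hne
  | cons c rest =>
    have hck : c.1 = k := hk c List.mem_cons_self
    have hall : ∀ x ∈ c :: rest, (fun (y : Int × Int) => y.1 == c.1) x = true := by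
      intro x hx; simp [hk x hx, hck]
    rw [pvGoB]
    simp only [List.takeWhile_eq_self_iff.mpr hall, List.dropWhile_eq_nil_iff.mpr hall]
    simp [pvGoB, hck]

-- pvGoB distributes over a trailing run whose rank differs from p's last card
lemma pvGoB_append (n : Nat) : ∀ (p r : List (Int × Int)) (k : Int), p.length ≤ n →
    (∀ hne : p ≠ [], (p.getLast hne).1 ≠ k) → r ≠ [] → (∀ x ∈ r, x.1 = k) →
    pvGoB (p ++ r) = ((pvGoB p).1 ++ r.take (r.length % 4),
                      (pvGoB p).2 ++ List.replicate (r.length / 4) (pvName k)) := by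
  induction n with
  | zero =>
    intro p r k hlen _ hr hk
    have hp : p = [] := List.eq_nil_of_length_eq_zero (Nat.le_zero.mp hlen)
    subst hp
    simp [pvGoB_single r k hr hk, pvGoB]
  | succ n ihn =>
    intro p r k hlen hp hr hk
    cases p with
    | nil => simp [pvGoB_single r k hr hk, pvGoB]
    | cons c rest =>
      rw [List.cons_append, pvGoB]
      conv_rhs => rw [pvGoB]
      rw [← List.cons_append]
      by_cases hdw : List.dropWhile (fun x => x.1 == c.1) (c :: rest) = []
      · have hall : ∀ x ∈ c :: rest, (fun (y : Int × Int) => y.1 == c.1) x = true :=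
          List.dropWhile_eq_nil_iff.mp hdw
        have hck : c.1 ≠ k := by
          have hlast := hp (List.cons_ne_nil c rest)
          have h2 := hall _ (List.getLast_mem (List.cons_ne_nil c rest))
          simp only [beq_iff_eq] at h2
          rw [← h2]; exact hlast
        have htwr : List.takeWhile (fun (y : Int × Int) => y.1 == c.1) r = [] := by
          cases r with
          | nil => rfl
          | cons d t =>
            have : (d.1 == c.1) = false := by
              simp [hk d List.mem_cons_self]
              exact fun h => hck h.symm
            simp [this]
        have hdwr : List.dropWhile (fun (y : Int × Int) => y.1 == c.1) r = r := by
          cases r with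
          | nil => rfl
          | cons d t =>
            have : (d.1 == c.1) = false := by
              simp [hk d List.mem_cons_self]
              exact fun h => hck h.symm
            simp [this]
        rw [pvTwApp _ _ _ hall, pvDwApp _ _ _ hall, htwr, hdwr,
          List.takeWhile_eq_self_iff.mpr hall, hdw]
        rw [pvGoB_single r k hr hk]
        simp [pvGoB]
      · rw [pvTwApp' _ _ _ hdw, pvDwApp' _ _ _ hdw]
        have hlen2 : (List.dropWhile (fun (y : Int × Int) => y.1 == c.1) (c :: rest)).length ≤ n := by
          simp only [List.dropWhile_cons, beq_self_eq_true, if_true]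
          have := List.length_dropWhile_le (fun (y : Int × Int) => y.1 == c.1) rest
          simp at hlen
          omega
        have hlast2 : ∀ hne : List.dropWhile (fun (y : Int × Int) => y.1 == c.1) (c :: rest) ≠ [],
            ((List.dropWhile (fun (y : Int × Int) => y.1 == c.1) (c :: rest)).getLast hne).1 ≠ k := by
          intro hne
          have hcr : (c :: rest : List (Int × Int)) ≠ [] := List.cons_ne_nil c rest
          have key : (c :: rest).getLast? =
              (List.dropWhile (fun (y : Int × Int) => y.1 == c.1) (c :: rest)).getLast? := by
            conv_lhs => rw [← List.takeWhile_append_dropWhile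
              (p := fun (y : Int × Int) => y.1 == c.1) (l := c :: rest)]
            exact List.getLast?_append_of_ne_nil _ hne
          rw [List.getLast?_eq_some_getLast hcr, List.getLast?_eq_some_getLast hne] at key
          rw [← Option.some_inj.mp key]
          exact hp hcr
        rw [ihn _ r k hlen2 hlast2 hr hk]
        simp [List.append_assoc]

-- main induction: A's full loop equals B's run decomposition
lemma pvMain (n : Nat) : ∀ (hand : List (Int × Int)), hand.length ≤ n → ∀ (s : List String) (a : Int),
    pvLoopA hand s 0 a hand.length = ((pvGoB hand).1, s ++ (pvGoB hand).2.reverse) := by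
  induction n with
  | zero =>
    intro hand hlen s a
    have : hand = [] := List.eq_nil_of_length_eq_zero (Nat.le_zero.mp hlen)
    subst this
    simp [pvLoopA, pvGoB]
  | succ n ihn =>
    intro hand hlen s a
    by_cases hh : hand = []
    · subst hh; simp [pvLoopA, pvGoB]
    · -- decompose hand = p ++ r, r the maximal trailing run of the last card's rank k
      have hrev : hand.reverse ≠ [] := by simpa using hh
      set k := (hand.getLast hh).1 with hkdef
      set r := (hand.reverse.takeWhile (fun (x : Int × Int) => x.1 == k)).reverse with hrdef
      set p := (hand.reverse.dropWhile (fun (x : Int × Int) => x.1 == k)).reverse with hpdef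
      have hpr : hand = p ++ r := by
        conv_lhs => rw [← List.reverse_reverse hand,
          ← List.takeWhile_append_dropWhile (p := fun (x : Int × Int) => x.1 == k) (l := hand.reverse)]
        rw [List.reverse_append]
      have hrne : r ≠ [] := by
        rw [hrdef]
        simp only [ne_eq, List.reverse_eq_nil_iff]
        cases hc : hand.reverse with
        | nil => exact absurd hc hrev
        | cons y ys =>
          have hy : y = hand.getLast hh := by
            have := List.head_reverse (l := hand) (by rw [hc]; exact List.cons_ne_nil y ys)
            simpa [hc] using this
          have hyk : (y.1 == k) = true := by simp [hy, hkdef]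
          simp [hyk]
      have hrk : ∀ x ∈ r, x.1 = k := by
        intro x hx
        have hx2 : x ∈ List.takeWhile (fun (y : Int × Int) => y.1 == k) hand.reverse := by
          rw [hrdef] at hx; exact List.mem_reverse.mp hx
        have := List.mem_takeWhile_imp hx2
        simpa using this
      have hpk : ∀ hne : p ≠ [], (p.getLast hne).1 ≠ k := by
        intro hne
        have hdw : hand.reverse.dropWhile (fun (x : Int × Int) => x.1 == k) ≠ [] := by
          rw [hpdef] at hne; simpa using hne
        have hhead := List.head_dropWhile_not (fun (x : Int × Int) => x.1 == k) hdw
        have e : p.getLast? =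
            some ((List.dropWhile (fun (x : Int × Int) => x.1 == k) hand.reverse).head hdw) := by
          rw [hpdef, List.getLast?_reverse]
          exact List.head?_eq_some_head hdw
        rw [List.getLast?_eq_some_getLast hne] at e
        rw [Option.some_inj.mp e]
        simpa using hhead
      have hlen2 : hand.length = p.length + r.length := by rw [hpr, List.length_append]
      rw [pvLoopA_count0 hand s a k hand.length]
      rw [hlen2]
      conv_lhs => rw [hpr]
      rw [pvLoopA_run r.length r p s k rfl hrk]
      by_cases hp0 : p = []
      · have hhand : hand = r := by rw [hpr, hp0, List.nil_append]
        rw [hp0]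
        simp only [List.length_nil, List.nil_append, pvLoopA]
        rw [hhand, pvGoB_single r k hrne hrk]
        simp [List.reverse_replicate]
      · have hpne : p ≠ [] := hp0
        obtain ⟨i, hi⟩ : ∃ i, p.length = i + 1 := by
          refine ⟨p.length - 1, ?_⟩
          have : p.length ≠ 0 := fun h => hpne (List.eq_nil_of_length_eq_zero h)
          omega
        rw [hi]
        -- one step: p's last card has a different rank, so count resets to 1
        simp only [pvLoopA]
        have hiP : i < p.length := by omega
        have hxval : (PySem.List.pyGet? (p ++ r.take (r.length % 4)) (i : Int)).getD (0, 0) =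
            p.getLast hpne := by
          rw [PySem.List.pyGet?_natCast, List.getElem?_append_left hiP,
            List.getElem?_eq_getElem hiP]
          simp only [Option.getD_some]
          have : i = p.length - 1 := by omega
          subst this
          exact List.getElem_length_sub_one_eq_getLast (by omega)
        rw [hxval]
        have hne' : k ≠ (p.getLast hpne).1 := fun h => hpk hpne h.symm
        have hcond : (k ≠ (p.getLast hpne).1) = True := by simp [hne']
        simp only [hcond, if_true, if_neg (by norm_num : ¬ ((1 : Int) = 4))]
        -- the kept leftover cards beyond fuel i+1-1 are untouched
        rw [pvLoopA_suffix i p (r.take (r.length % 4)) _ 1 (p.getLast hpne).1 (by norm_num)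
          (by omega)]
        -- fold the step back on p alone and apply the induction hypothesis
        have hback : pvLoopA p (s ++ List.replicate (r.length / 4) (pvName k)) 1
            (p.getLast hpne).1 i =
            pvLoopA p (s ++ List.replicate (r.length / 4) (pvName k)) 0 k p.length := by
          conv_rhs => rw [hi]
          simp only [pvLoopA]
          have hxval2 : (PySem.List.pyGet? p (i : Int)).getD (0, 0) = p.getLast hpne := by
            rw [PySem.List.pyGet?_natCast, List.getElem?_eq_getElem hiP]
            simp only [Option.getD_some]
            have : i = p.length - 1 := by omega
            subst this
            exact List.getElem_length_sub_one_eq_getLast (by omega)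
          rw [hxval2]
          simp only [hcond, if_true, if_neg (by norm_num : ¬ ((1 : Int) = 4))]
        rw [hback]
        have hplen : p.length ≤ n := by
          have : 1 ≤ r.length := List.length_pos_of_ne_nil hrne
          omega
        rw [ihn p hplen (s ++ List.replicate (r.length / 4) (pvName k)) k]
        rw [hpr, pvGoB_append p.length p r k le_rfl hpk hrne hrk]
        simp [List.reverse_replicate, List.append_assoc]

-- ===== VERDICT (by name: the statement is the Claim_ definition above) =====
theorem checksets_spec : Claim_equal_checksets := by
  intro hand sets _
  unfold Spec_checksets checksets checksets_alt
  by_cases h : hand = []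
  · subst h; simp [pvGoB]
  · simp only [h, ne_eq, not_false_iff, if_true]
    exact pvMain hand.length hand le_rfl sets 0
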